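-- pv_equiv track=rewrite | github.com/hanja1500/SIAM-W | info_crawling.py | SQLi_type
-- ===== SOURCE A (Python) =====
-- def SQLi_type(info):
--     data = []
--     read = False
--
--     for line in info:
--         line = line.strip() # 줄 끝의 줄바꿈 문자 제거
--         if read:
--             data.append(line)
--         if line == '---':
--             if read:
--                 data.pop()  # 맨 마지막 --- 제거
--             read = not read
--     return data
-- ===== SOURCE B (Python) =====
-- def SQLi_type(info):
--     # Split stripped lines into segments at every '---' marker, then
--     # concatenate the odd-indexed segments (the regions between markers).
--     segs = [[]]
--     for line in info:
--         s = line.strip()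
--         if s == '---':
--             segs.append([])
--         else:
--             segs[-1].append(s)
--     out = []
--     for i, seg in enumerate(segs):
--         if i % 2 == 1:
--             out += seg
--     return out
-- ===== Notes on version B (the rewrite author's own statement) =====
-- stated objective: alternative
-- what changed: Replaces A's single toggling pass with append-then-pop correction by a split-into-segments-at-'---' phase followed by selecting and concatenating the odd-indexed segments.
import Mathlib
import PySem

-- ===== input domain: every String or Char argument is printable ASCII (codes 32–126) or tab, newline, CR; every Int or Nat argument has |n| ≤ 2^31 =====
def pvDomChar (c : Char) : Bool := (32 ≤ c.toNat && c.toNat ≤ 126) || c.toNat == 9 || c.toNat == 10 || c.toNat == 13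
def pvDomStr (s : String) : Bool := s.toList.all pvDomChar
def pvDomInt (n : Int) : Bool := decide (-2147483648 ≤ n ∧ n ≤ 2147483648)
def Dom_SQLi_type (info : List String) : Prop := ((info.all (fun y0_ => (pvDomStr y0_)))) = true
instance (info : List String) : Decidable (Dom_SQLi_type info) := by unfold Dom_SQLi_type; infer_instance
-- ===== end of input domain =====

-- B replaces A's toggling pass (append/pop correction) by splitting the stripped
-- lines into segments at '---' and concatenating the odd-indexed segments; same cost.


-- ===== PORT A =====
-- literal port of A's loop state (data, read); 'data.pop()' pops the element
-- just appended (data is nonempty there), which is List.dropLast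
def SQLi_type (info : List String) : List String :=
  (info.foldl
    (fun (st : List String × Bool) l =>
      let line := PySem.Str.strip l
      let data := if st.2 then st.1 ++ [line] else st.1
      if line = "---" then ((if st.2 then data.dropLast else data), !st.2)
      else (data, st.2))
    ([], false)).1

-- ===== PORT B =====
-- Source B: build segments split at '---', then concatenate odd-indexed segments
def SQLi_type_alt (info : List String) : List String :=
  let segs := info.foldl
    (fun (segs : List (List String)) l =>
      let s := PySem.Str.strip l
      if s = "---" then segs ++ [[]]
      else segs.dropLast ++ [(segs.getLastD []) ++ [s]])
    [[]]
  (PySem.List.enumerate segs 0).foldl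
    (fun out p => if p.1 % 2 = 1 then out ++ p.2 else out) []

-- ===== PRECONDITION & SPEC =====
def Spec_SQLi_type (info : List String) (out : List String) : Prop := out = SQLi_type_alt info
instance (info : List String) (out : List String) : Decidable (Spec_SQLi_type info out) := by unfold Spec_SQLi_type; infer_instance

-- ===== CLAIM (what is proved, stated in full; the proofs are below) =====
def Claim_equal_SQLi_type : Prop := ∀ (info : List String), Dom_SQLi_type info → Spec_SQLi_type info (SQLi_type info)

-- ===== LEMMAS AND PROOFS =====

-- proof-side abbreviations for the two folds
def pvStepA (st : List String × Bool) (l : String) : List String × Bool :=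
  let line := PySem.Str.strip l
  let data := if st.2 then st.1 ++ [line] else st.1
  if line = "---" then ((if st.2 then data.dropLast else data), !st.2)
  else (data, st.2)

def pvStepB (segs : List (List String)) (l : String) : List (List String) :=
  let s := PySem.Str.strip l
  if s = "---" then segs ++ [[]]
  else segs.dropLast ++ [(segs.getLastD []) ++ [s]]

-- odd-indexed selection, as a flatMap over enumerate starting at s
def pvSel (s : Int) (segs : List (List String)) : List String :=
  (PySem.List.enumerate segs s).flatMap (fun p => if p.1 % 2 = 1 then p.2 else [])

theorem pvSel_concat (s : Int) (gs : List (List String)) (x : List String) :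
    pvSel s (gs ++ [x]) = pvSel s gs ++ (if (s + gs.length) % 2 = 1 then x else []) := by
  simp [pvSel, PySem.List.enumerate_append, PySem.List.enumerate_cons]

theorem pvPhase2_eq (segs : List (List String)) :
    ((PySem.List.enumerate segs 0).foldl
      (fun out p => if p.1 % 2 = 1 then out ++ p.2 else out) [])
    = pvSel 0 segs := by
  have h : ∀ (acc : List String) (p : Int × List String),
      (if p.1 % 2 = 1 then acc ++ p.2 else acc)
      = acc ++ (if p.1 % 2 = 1 then p.2 else []) := by
    intro acc p; split <;> simp
  calc ((PySem.List.enumerate segs 0).foldl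
        (fun out p => if p.1 % 2 = 1 then out ++ p.2 else out) [])
      = ((PySem.List.enumerate segs 0).foldl
        (fun out p => out ++ (if p.1 % 2 = 1 then p.2 else [])) []) := by
        apply PySem.List.foldl_congr_mem
        intro acc p _
        exact h acc p
    _ = pvSel 0 segs := by
        rw [PySem.List.foldl_append_eq_flatMap]; simp [pvSel]

-- main invariant: A's fold state corresponds to (odd-selection, parity) of B's segments
theorem pvInv (info : List String) : ∀ (gs : List (List String)), gs ≠ [] →
    info.foldl pvStepA (pvSel 0 gs, decide (gs.length % 2 = 0))
    = (pvSel 0 (info.foldl pvStepB gs),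
       decide ((info.foldl pvStepB gs).length % 2 = 0)) := by
  induction info with
  | nil => intro gs _; rfl
  | cons l rest ih =>
    intro gs hne
    obtain ⟨gs', cur, hgs⟩ := (List.eq_nil_or_concat gs).resolve_left hne
    rw [List.concat_eq_append] at hgs
    subst hgs
    simp only [List.foldl_cons]
    by_cases hsep : PySem.Str.strip l = "---"
    · have hA : pvStepA (pvSel 0 (gs' ++ [cur]), decide ((gs' ++ [cur]).length % 2 = 0)) l
          = (pvSel 0 (gs' ++ [cur]), !decide ((gs' ++ [cur]).length % 2 = 0)) := by
        simp only [pvStepA, hsep, List.length_append, List.length_cons, List.length_nil]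
        by_cases hr : (gs'.length + 1) % 2 = 0
        · simp [hr]
        · simp [hr]
      have hB : pvStepB (gs' ++ [cur]) l = (gs' ++ [cur]) ++ [[]] := by
        simp [pvStepB, hsep]
      rw [hA]; simp only [hB]
      have hsel : pvSel 0 ((gs' ++ [cur]) ++ [[]]) = pvSel 0 (gs' ++ [cur]) := by
        rw [pvSel_concat]; split <;> simp
      have hpar : (!decide ((gs' ++ [cur]).length % 2 = 0))
          = decide (((gs' ++ [cur]) ++ [[]]).length % 2 = 0) := by
        simp only [List.length_append, List.length_cons, List.length_nil]
        by_cases hr : (gs'.length + 1) % 2 = 0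
        · have : ¬ ((gs'.length + 1 + 1) % 2 = 0) := by omega
          simp [hr, this]
        · have : (gs'.length + 1 + 1) % 2 = 0 := by omega
          simp [hr, this]
      rw [hpar, ← hsel]
      exact ih _ (by simp)
    · have hB : pvStepB (gs' ++ [cur]) l
          = gs' ++ [cur ++ [PySem.Str.strip l]] := by
        simp [pvStepB, hsep]
      have hA : pvStepA (pvSel 0 (gs' ++ [cur]), decide ((gs' ++ [cur]).length % 2 = 0)) l
          = (pvSel 0 (gs' ++ [cur ++ [PySem.Str.strip l]]),
             decide ((gs' ++ [cur ++ [PySem.Str.strip l]]).length % 2 = 0)) := by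
        simp only [pvStepA, hsep]
        rw [pvSel_concat, pvSel_concat]
        simp only [List.length_append, List.length_cons, List.length_nil]
        by_cases hodd : gs'.length % 2 = 1
        · have h1 : (gs'.length + 1) % 2 = 0 := by omega
          have h2 : ((gs'.length : Int)) % 2 = 1 := by omega
          simp [h1, h2]
        · have h1 : ¬ ((gs'.length + 1) % 2 = 0) := by omega
          have h2 : ¬ (((gs'.length : Int)) % 2 = 1) := by omega
          simp [h1, h2]
      rw [hA]; simp only [hB]
      exact ih _ (by simp)

-- ===== VERDICT (by name: the statement is the Claim_ definition above) =====
theorem SQLi_type_spec : Claim_equal_SQLi_type := by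
  intro info _
  unfold Spec_SQLi_type SQLi_type SQLi_type_alt
  rw [pvPhase2_eq]
  have h0 : pvSel 0 [[]] = [] := by decide
  have hfA : (fun (st : List String × Bool) l =>
      let line := PySem.Str.strip l
      let data := if st.2 then st.1 ++ [line] else st.1
      if line = "---" then ((if st.2 then data.dropLast else data), !st.2)
      else (data, st.2)) = pvStepA := rfl
  have hfB : (fun (segs : List (List String)) l =>
      let s := PySem.Str.strip l
      if s = "---" then segs ++ [[]]
      else segs.dropLast ++ [(segs.getLastD []) ++ [s]]) = pvStepB := rfl
  rw [hfA, hfB]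
  have := pvInv info [[]] (by simp)
  simp only [h0] at this
  have h1 : (decide (([[]] : List (List String)).length % 2 = 0)) = false := by decide
  rw [h1] at this
  exact congrArg Prod.fst this
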